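-- pv_equiv track=rewrite | github.com/NicholasLiem/IF2124_TugasBesar_JavaScriptParser | cyk.py | dictionary_CNF
-- ===== SOURCE A (Python) =====
-- def dictionary_CNF(CNF):
--     new_dict = {}
--     for rules in CNF :
--         new_dict[str(rules[0])] = []
--
--     for rules in CNF:
--         productions = []
--         for i in range(1,len(rules)):
--             temp = rules[i]
--             productions.append(temp)
--         new_dict[str(rules[0])].append(productions)
--     return new_dict
-- ===== SOURCE B (Python) =====
-- def dictionary_CNF(CNF):
--     new_dict = {}
--     for rules in CNF:
--         new_dict.setdefault(str(rules[0]), []).append(rules[1:])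
--     return new_dict
-- ===== Notes on version B (the rewrite author's own statement) =====
-- stated objective: idiomatic
-- what changed: Replaces A's two passes (key initialization, then an indexed inner loop appending productions) by a single pass using setdefault with a slice, creating keys lazily on first appearance.
import Mathlib
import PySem

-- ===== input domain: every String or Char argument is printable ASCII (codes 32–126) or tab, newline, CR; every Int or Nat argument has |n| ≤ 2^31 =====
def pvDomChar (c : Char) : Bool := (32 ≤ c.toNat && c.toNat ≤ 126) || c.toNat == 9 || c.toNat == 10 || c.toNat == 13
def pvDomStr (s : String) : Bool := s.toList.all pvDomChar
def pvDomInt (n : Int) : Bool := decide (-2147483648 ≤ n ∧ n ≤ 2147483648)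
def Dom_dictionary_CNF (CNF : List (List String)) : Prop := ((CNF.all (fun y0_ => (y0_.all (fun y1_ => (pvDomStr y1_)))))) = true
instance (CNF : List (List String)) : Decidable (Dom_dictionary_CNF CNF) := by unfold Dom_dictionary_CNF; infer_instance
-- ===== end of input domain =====

-- B collapses A's two passes into one idiomatic setdefault-and-append pass (keys created lazily, productions taken as a slice).

-- ===== PORT A =====
-- first pass: new_dict[str(rules[0])] = []   (str of a str is the identity; rules[0] via pyGet?, default unreachable under Pre_)
def dictA_init (CNF : List (List String)) : PySem.Dict String (List (List String)) :=
  CNF.foldl (fun d rules => d.insert ((PySem.List.pyGet? rules 0).getD "") []) PySem.Dict.empty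

-- inner loop: productions = []; for i in range(1,len(rules)): productions.append(rules[i])
def dictA_prods (rules : List String) : List String :=
  (PySem.List.pyRange 1 (rules.length : Int) 1).foldl
    (fun productions i => productions ++ [(PySem.List.pyGet? rules i).getD ""]) []

-- second pass: new_dict[str(rules[0])].append(productions)  (the key is always present after the first pass)
def dictionary_CNF (CNF : List (List String)) : List (String × List (List String)) :=
  (CNF.foldl
    (fun d rules => d.modify ((PySem.List.pyGet? rules 0).getD "") [] (fun l => l ++ [dictA_prods rules]))
    (dictA_init CNF)).items

-- ===== PORT B =====
-- single pass: new_dict.setdefault(str(rules[0]), []).append(rules[1:])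
def dictionary_CNF_alt (CNF : List (List String)) : List (String × List (List String)) :=
  (CNF.foldl
    (fun d rules => d.modify ((PySem.List.pyGet? rules 0).getD "") [] (fun l => l ++ [PySem.List.slice rules (some 1) none]))
    PySem.Dict.empty).items

-- ===== PRECONDITION & SPEC =====
-- Pre_ excludes inputs containing an empty rule: there 'rules[0]' raises IndexError (in A and in B alike).
def Pre_dictionary_CNF (CNF : List (List String)) : Prop := ∀ r ∈ CNF, r ≠ []
instance (CNF : List (List String)) : Decidable (Pre_dictionary_CNF CNF) := by unfold Pre_dictionary_CNF; infer_instance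

def pvWitness_dictionary_CNF : List (List String) := [["S", "A", "B"], ["S", "a"], ["A", "b"]]

def Spec_dictionary_CNF (CNF : List (List String)) (out : List (String × List (List String))) : Prop := out = dictionary_CNF_alt CNF
instance (CNF : List (List String)) (out : List (String × List (List String))) : Decidable (Spec_dictionary_CNF CNF out) := by unfold Spec_dictionary_CNF; infer_instance

-- ===== CLAIM (what is proved, stated in full; the proofs are below) =====
def Claim_equal_dictionary_CNF : Prop := ∀ (CNF : List (List String)), Dom_dictionary_CNF CNF → Pre_dictionary_CNF CNF → Spec_dictionary_CNF CNF (dictionary_CNF CNF)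

-- ===== LEMMAS AND PROOFS =====

-- A's inner index loop builds exactly the tail slice rules[1:].
lemma dictA_prods_eq_slice (rules : List String) :
    dictA_prods rules = PySem.List.slice rules (some 1) none := by
  rw [PySem.List.slice_from_one]
  unfold dictA_prods
  rw [PySem.List.foldl_append_singleton_eq_map, PySem.List.pyRange_one, List.map_map]
  apply List.ext_getElem
  · simp
  · intro k h1 h2
    simp only [List.nil_append, List.getElem_map, List.getElem_range, Function.comp_apply] at h1 ⊢
    have : (1 : Int) + (k : Int) = ((k + 1 : Nat) : Int) := by push_cast; ring
    rw [this, PySem.List.pyGet?_natCast]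
    simp at h1
    rw [List.getElem?_eq_getElem (by omega)]
    simp [List.getElem_tail]

-- A's first pass maps every key to [].
lemma getD_init_aux (CNF : List (List String)) (k : String)
    (d : PySem.Dict String (List (List String))) (hd : d.getD k [] = []) :
    (CNF.foldl (fun d rules => d.insert ((PySem.List.pyGet? rules 0).getD "") []) d).getD k [] = [] := by
  induction CNF generalizing d with
  | nil => simpa using hd
  | cons r rest ih =>
      simp only [List.foldl_cons]
      apply ih
      rw [PySem.Dict.getD_insert]
      split_ifs <;> simp [hd]

-- Core: the accumulation pass started from A's all-[]-initialized dict yields the same items as started from the empty dict.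
lemma items_fold_init_eq_fold_empty (CNF : List (List String)) :
    (CNF.foldl (fun d rules => d.modify ((PySem.List.pyGet? rules 0).getD "") [] (fun l => l ++ [PySem.List.slice rules (some 1) none]))
       (CNF.foldl (fun d rules => d.insert ((PySem.List.pyGet? rules 0).getD "") []) PySem.Dict.empty)).items
    = (CNF.foldl (fun d rules => d.modify ((PySem.List.pyGet? rules 0).getD "") [] (fun l => l ++ [PySem.List.slice rules (some 1) none]))
       PySem.Dict.empty).items := by
  set key : List String → String := fun r => (PySem.List.pyGet? r 0).getD "" with hkey
  set val : List String → List String := fun r => PySem.List.slice r (some 1) none with hval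
  set d0 : PySem.Dict String (List (List String)) :=
    CNF.foldl (fun d rules => d.insert (key rules) []) PySem.Dict.empty with hd0
  have hnd0 : d0.keys.Nodup := by
    rw [hd0]
    exact PySem.Dict.nodup_keys_foldl_insert_key _ key _ _ PySem.Dict.nodup_keys_empty
  have hndL : (CNF.foldl (fun d r => d.modify (key r) [] (fun l => l ++ [val r])) d0).keys.Nodup :=
    PySem.Dict.nodup_keys_foldl_modify_key _ key _ _ _ hnd0
  have hndR : (CNF.foldl (fun d r => d.modify (key r) [] (fun l => l ++ [val r])) PySem.Dict.empty).keys.Nodup :=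
    PySem.Dict.nodup_keys_foldl_modify_key _ key _ _ _ PySem.Dict.nodup_keys_empty
  have hk0 : d0.keys = PySem.Set.ofList (CNF.map key) := by
    rw [hd0, PySem.Dict.keys_foldl_insert_key, PySem.Dict.keys_empty, PySem.Set.update_nil_left]
  have hkL : (CNF.foldl (fun d r => d.modify (key r) [] (fun l => l ++ [val r])) d0).keys
      = PySem.Set.ofList (CNF.map key) := by
    rw [PySem.Dict.keys_foldl_modify_key, hk0, PySem.Set.update_eq_append_filter]
    have h0 : (PySem.Set.ofList (CNF.map key)).filter
        (fun y => !(PySem.Set.contains (PySem.Set.ofList (CNF.map key)) y)) = [] := by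
      apply List.filter_eq_nil_iff.mpr
      intro a ha
      simp [PySem.Set.contains, ha]
    rw [h0, List.append_nil]
  have hkR : (CNF.foldl (fun d r => d.modify (key r) [] (fun l => l ++ [val r])) PySem.Dict.empty).keys
      = PySem.Set.ofList (CNF.map key) := by
    rw [PySem.Dict.keys_foldl_modify_key, PySem.Dict.keys_empty, PySem.Set.update_nil_left]
  have hfold : ∀ d : PySem.Dict String (List (List String)),
      CNF.foldl (fun d r => d.modify (key r) [] (fun l => l ++ [val r])) d
      = (CNF.map (fun r => (key r, val r))).foldl (fun d p => d.modify p.1 [] (fun l => l ++ [p.2])) d := by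
    intro d; rw [List.foldl_map]
  have hgD : ∀ c, (CNF.foldl (fun d r => d.modify (key r) [] (fun l => l ++ [val r])) d0).getD c []
      = (CNF.foldl (fun d r => d.modify (key r) [] (fun l => l ++ [val r])) PySem.Dict.empty).getD c [] := by
    intro c
    rw [hfold, hfold, PySem.Dict.getD_foldl_modify_append, PySem.Dict.getD_foldl_modify_append]
    rw [PySem.Dict.getD_empty]
    rw [hd0, getD_init_aux _ _ _ (by rw [PySem.Dict.getD_empty])]
  rw [PySem.Dict.items_eq_map_keys _ hndL ([] : List (List String)),
      PySem.Dict.items_eq_map_keys _ hndR ([] : List (List String)), hkL, hkR]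
  apply List.map_congr_left
  intro c _
  rw [hgD c]

-- ===== VERDICT (by name: the statement is the Claim_ definition above) =====
theorem dictionary_CNF_spec : Claim_equal_dictionary_CNF := by
  intro CNF _ _
  show dictionary_CNF CNF = dictionary_CNF_alt CNF
  simp only [dictionary_CNF, dictionary_CNF_alt, dictA_init, dictA_prods_eq_slice]
  exact items_fold_init_eq_fold_empty CNF
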